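-- pv_equiv track=rewrite | github.com/Silakge/MIRAGE | p_word.py | add_specific_pattern
-- ===== SOURCE A (Python) =====
-- def add_specific_pattern(word):
--     """
--     Add a specific pattern of symbols: add * after each character,
--     and insert & in the middle of the word.
--
--     Args:
--         word (str): The original word
--
--     Returns:
--         str: The word after adding symbols
--     """
--     if not word or word == "No sensitive word detected":
--         return word
--
--     chars = list(word)
--     processed_chars = []
--
--     for i, char in enumerate(chars):
--         processed_chars.append(char)
--
--         # Add * after each character
--         if i < len(chars) - 1:
--             processed_chars.append('*')
--
--         # Insert & in the middle of the word
--         if i == len(chars) // 2 - 1: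
--             processed_chars.append('&')
--
--     return ''.join(processed_chars)
-- ===== SOURCE B (Python) =====
-- def add_specific_pattern(word):
--     """Same result as A: '*' after each char (not the last) and '&' after the
--     middle char's '*'; built by join + one slice insertion instead of a loop."""
--     if not word or word == "No sensitive word detected":
--         return word
--     starred = '*'.join(word)
--     if len(word) < 2:
--         return starred
--     pos = 2 * (len(word) // 2)
--     return starred[:pos] + '&' + starred[pos:]
-- ===== Notes on version B (the rewrite author's own statement) =====
-- stated objective: simpler
-- what changed: Replaces A's enumerate loop (per-index star/ampersand conditions, list append per char) by str.join of the word followed by a single slice insertion at position 2*(len(word)//2).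
import Mathlib
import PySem

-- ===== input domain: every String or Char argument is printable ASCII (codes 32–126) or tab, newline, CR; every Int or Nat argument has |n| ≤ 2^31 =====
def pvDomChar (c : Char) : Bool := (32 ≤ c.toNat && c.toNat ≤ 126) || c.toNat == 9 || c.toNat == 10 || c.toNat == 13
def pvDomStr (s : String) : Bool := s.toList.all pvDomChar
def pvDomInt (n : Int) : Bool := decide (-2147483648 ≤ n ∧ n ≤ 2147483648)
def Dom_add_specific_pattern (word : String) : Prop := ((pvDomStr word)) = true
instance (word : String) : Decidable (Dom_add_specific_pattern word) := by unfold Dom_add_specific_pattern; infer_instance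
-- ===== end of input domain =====

-- B replaces A's index-tracking loop by a '*'.join plus one slice insertion at 2*(len//2) (simpler decomposition; same O(n) cost).

-- ===== PORT A =====
def add_specific_pattern (word : String) : String :=
  if word = "" ∨ word = "No sensitive word detected" then word
  else
    let chars := word.toList
    let n : Int := (chars.length : Int)
    let processed := (PySem.List.enumerate chars).foldl
      (fun acc ic =>
        let a1 := acc ++ [ic.2]
        let a2 := if ic.1 < n - 1 then a1 ++ ['*'] else a1
        if ic.1 = PySem.Int.floordiv n 2 - 1 then a2 ++ ['&'] else a2) []
    String.ofList processed

-- ===== PORT B =====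
def add_specific_pattern_alt (word : String) : String :=
  if word = "" ∨ word = "No sensitive word detected" then word
  else
    let cs := word.toList
    let starred := PySem.Chars.join ['*'] (cs.map (fun c => [c]))
    if cs.length < 2 then String.ofList starred
    else
      let pos : Int := 2 * PySem.Int.floordiv (cs.length : Int) 2
      String.ofList (PySem.List.slice starred none (some pos) ++
                     '&' :: PySem.List.slice starred (some pos) none)

-- ===== PRECONDITION & SPEC =====
def Spec_add_specific_pattern (word : String) (out : String) : Prop := out = add_specific_pattern_alt word
instance (word : String) (out : String) : Decidable (Spec_add_specific_pattern word out) := by unfold Spec_add_specific_pattern; infer_instance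

-- ===== CLAIM (what is proved, stated in full; the proofs are below) =====
def Claim_equal_add_specific_pattern : Prop := ∀ (word : String), Dom_add_specific_pattern word → Spec_add_specific_pattern word (add_specific_pattern word)

-- ===== LEMMAS AND PROOFS =====

-- the per-element contribution of A's loop body (n = len, m = len // 2)
def pvG (n m : Nat) (ic : Int × Char) : List Char :=
  [ic.2] ++ (if ic.1 < (n : Int) - 1 then ['*'] else []) ++ (if ic.1 = (m : Int) - 1 then ['&'] else [])

-- each char followed by a star
def pvS (l : List Char) : List Char := l.flatMap (fun c => [c, '*'])

theorem pvS_length (l : List Char) : (pvS l).length = 2 * l.length := by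
  induction l with
  | nil => simp [pvS]
  | cons a t ih => simp [pvS] at ih ⊢; omega

theorem pv_join_append (l1 l2 : List Char) (h2 : l2 ≠ []) :
    PySem.Chars.join ['*'] ((l1 ++ l2).map (fun c => [c]))
      = pvS l1 ++ PySem.Chars.join ['*'] (l2.map (fun c => [c])) := by
  induction l1 with
  | nil => simp [pvS]
  | cons a t ih =>
    obtain ⟨b, r, hr⟩ := List.exists_cons_of_ne_nil (by simp [h2] : t ++ l2 ≠ [])
    calc PySem.Chars.join ['*'] (((a :: t) ++ l2).map (fun c => [c]))
        = PySem.Chars.join ['*'] ([a] :: [b] :: r.map (fun c => [c])) := by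
          simp [hr]
      _ = [a] ++ ['*'] ++ PySem.Chars.join ['*'] ([b] :: r.map (fun c => [c])) :=
          PySem.Chars.join_cons_cons _ _ _ _
      _ = [a] ++ ['*'] ++ PySem.Chars.join ['*'] ((t ++ l2).map (fun c => [c])) := by
          simp [hr]
      _ = pvS (a :: t) ++ PySem.Chars.join ['*'] (l2.map (fun c => [c])) := by
          rw [ih]; simp [pvS]

theorem pv_flat_tail (n m : Nat) (l : List Char) :
    ∀ (s : Nat), l ≠ [] → m ≤ s → s + l.length = n →
    (PySem.List.enumerate l (s : Int)).flatMap (pvG n m)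
      = PySem.Chars.join ['*'] (l.map (fun c => [c])) := by
  induction l with
  | nil => intro s h; exact absurd rfl h
  | cons a t ih =>
    intro s _ hms hsn
    rw [PySem.List.enumerate_cons]
    cases t with
    | nil =>
      have hsn' : s + 1 = n := by simpa using hsn
      simp only [List.flatMap_cons, PySem.List.enumerate_nil, List.flatMap_nil, pvG]
      rw [if_neg (by omega : ¬ ((s:Int) < (n:Int) - 1)),
          if_neg (by omega : ¬ ((s:Int) = (m:Int) - 1))]
      simp [PySem.Chars.join_singleton]
    | cons b r =>
      have ht : (s : Int) + 1 = ((s + 1 : Nat) : Int) := by push_cast; ring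
      rw [List.flatMap_cons, ht, ih (s + 1) (by simp) (by omega) (by simp at hsn ⊢; omega)]
      have hstar : ((s : Int)) < (n : Int) - 1 := by simp at hsn; omega
      have hamp : ¬ ((s : Int)) = (m : Int) - 1 := by omega
      simp only [pvG, if_pos hstar, if_neg hamp]
      rw [show (b :: r).map (fun c => [c]) = [b] :: r.map (fun c => [c]) by simp,
          show (a :: b :: r).map (fun c => [c]) = [a] :: [b] :: r.map (fun c => [c]) by simp,
          PySem.Chars.join_cons_cons]
      simp

theorem pv_flat_head (n m : Nat) (hmn : m + 1 ≤ n) (l : List Char) :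
    ∀ (s : Nat), l ≠ [] → s + l.length = m →
    (PySem.List.enumerate l (s : Int)).flatMap (pvG n m) = pvS l ++ ['&'] := by
  induction l with
  | nil => intro s h; exact absurd rfl h
  | cons a t ih =>
    intro s _ hsm
    rw [PySem.List.enumerate_cons]
    cases t with
    | nil =>
      simp only [List.flatMap_cons, PySem.List.enumerate_nil, List.flatMap_nil, pvG]
      have hs : s + 1 = m := by simpa using hsm
      rw [if_pos (by omega : ((s:Int)) < (n:Int) - 1), if_pos (by omega : ((s:Int)) = (m:Int) - 1)]
      simp [pvS]
    | cons b r =>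
      have ht : (s : Int) + 1 = ((s + 1 : Nat) : Int) := by push_cast; ring
      have hlen : s + (b :: r).length + 1 = m := by simpa using hsm
      rw [List.flatMap_cons, ht, ih (s + 1) (by simp) (by omega)]
      have hstar : ((s : Int)) < (n : Int) - 1 := by simp at hlen ⊢; omega
      have hamp : ¬ ((s : Int)) = (m : Int) - 1 := by simp at hlen; omega
      simp only [pvG, if_pos hstar, if_neg hamp]
      simp [pvS]

-- ===== VERDICT (by name: the statement is the Claim_ definition above) =====
theorem add_specific_pattern_spec : Claim_equal_add_specific_pattern := by
  intro word _
  unfold Spec_add_specific_pattern add_specific_pattern add_specific_pattern_alt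
  by_cases hg : word = "" ∨ word = "No sensitive word detected"
  · simp [hg]
  · simp only [if_neg hg]
    set cs := word.toList with hcs
    have hne : cs ≠ [] := by
      intro h
      exact hg (Or.inl (by rw [← word.ofList_toList, ← hcs, h]))
    set n := cs.length with hn
    have hn1 : 1 ≤ n := by
      rw [hn]
      exact List.length_pos_of_ne_nil hne
    set m := n / 2 with hm
    have hfd : PySem.Int.floordiv (n : Int) 2 = (m : Int) := by
      exact_mod_cast PySem.Int.floordiv_natCast n 2
    have hstep : (fun (acc : List Char) (ic : Int × Char) =>
        let a1 := acc ++ [ic.2]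
        let a2 := if ic.1 < (n : Int) - 1 then a1 ++ ['*'] else a1
        if ic.1 = PySem.Int.floordiv (n : Int) 2 - 1 then a2 ++ ['&'] else a2)
        = fun acc ic => acc ++ pvG n m ic := by
      funext acc ic
      simp only [pvG, hfd]
      split_ifs <;> simp
    rw [hstep, PySem.List.foldl_append_eq_flatMap, List.nil_append]
    by_cases h2 : n < 2
    · -- single character: no '*', no '&'
      have hn1' : n = 1 := by omega
      obtain ⟨a, t, ha⟩ := List.exists_cons_of_ne_nil hne
      have ht : t = [] := by
        have := hn1'; rw [hn, ha] at this; simpa using this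
      subst ht
      rw [if_pos (by omega : cs.length < 2), ha]
      simp only [PySem.List.enumerate_cons, PySem.List.enumerate_nil,
        List.flatMap_cons, List.flatMap_nil, pvG]
      rw [if_neg (by omega), if_neg (by omega)]
      simp [PySem.Chars.join_singleton]
    · -- general case: split at the middle
      rw [if_neg (by omega : ¬ cs.length < 2)]
      have hm1 : 1 ≤ m := by omega
      have hmn : m + 1 ≤ n := by omega
      have hsplit : cs = cs.take m ++ cs.drop m := (List.take_append_drop m cs).symm
      set l1 := cs.take m with hl1
      set l2 := cs.drop m with hl2
      have hlen1 : l1.length = m := by rw [hl1]; simp [← hn]; omega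
      have hlen2 : l2.length = n - m := by rw [hl2]; simp [← hn]
      have hne1 : l1 ≠ [] := by intro h; rw [h] at hlen1; simp at hlen1; omega
      have hne2 : l2 ≠ [] := by intro h; rw [h] at hlen2; simp at hlen2; omega
      have hpos : 2 * PySem.Int.floordiv (cs.length : Int) 2 = ((2 * m : Nat) : Int) := by
        rw [← hn, hfd]; push_cast; ring
      rw [hpos, PySem.List.slice_to_natCast, PySem.List.slice_from_natCast]
      conv_lhs => rw [hsplit]
      rw [PySem.List.enumerate_append, List.flatMap_append]
      have hh1 := pv_flat_head n m hmn l1 0 hne1 (by omega)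
      norm_num at hh1
      have hh2 := pv_flat_tail n m l2 m hne2 (le_refl m) (by omega)
      rw [zero_add, hlen1, hh1, hh2]
      conv_rhs => rw [hsplit]
      rw [pv_join_append l1 l2 hne2]
      have hlenS : (pvS l1).length = 2 * m := by rw [pvS_length, hlen1]
      rw [List.take_left' hlenS, List.drop_left' hlenS]
      simp
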